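-- pv_equiv track=rewrite | github.com/Pradas137/Python | Examen/Tipos_Ordenar_Burbujas.py | recursive_bubble_v2
-- ===== SOURCE A (Python) =====
-- def recursive_bubble_v2(list, iterations, comparisons):
--     if iterations > len(list)-1:
--         return list
--     if comparisons > len(list[iterations])-2:
--         return recursive_bubble_v2(list, iterations+1, 0)
--     if list[iterations][comparisons] > list[iterations][comparisons + 1]:
--         list[iterations][comparisons], list[iterations][comparisons + 1] = list[iterations][comparisons + 1], list[iterations][comparisons]
--     return recursive_bubble_v2(list, iterations, comparisons + 1)
-- ===== SOURCE B (Python) =====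
-- def recursive_bubble_v2(list, iterations, comparisons):
--     for i in range(iterations, len(list)):
--         start = comparisons if i == iterations else 0
--         for j in range(start, len(list[i]) - 1):
--             if list[i][j] > list[i][j + 1]:
--                 list[i][j], list[i][j + 1] = list[i][j + 1], list[i][j]
--     return list
-- ===== Notes on version B (the rewrite author's own statement) =====
-- stated objective: simpler
-- what changed: A's per-comparison tail recursion (one call per element) is replaced by two plain nested for-loops over ranges, with the starting offset applied only to the first row; return value identical, both mutate the list in place.
import Mathlib
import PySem

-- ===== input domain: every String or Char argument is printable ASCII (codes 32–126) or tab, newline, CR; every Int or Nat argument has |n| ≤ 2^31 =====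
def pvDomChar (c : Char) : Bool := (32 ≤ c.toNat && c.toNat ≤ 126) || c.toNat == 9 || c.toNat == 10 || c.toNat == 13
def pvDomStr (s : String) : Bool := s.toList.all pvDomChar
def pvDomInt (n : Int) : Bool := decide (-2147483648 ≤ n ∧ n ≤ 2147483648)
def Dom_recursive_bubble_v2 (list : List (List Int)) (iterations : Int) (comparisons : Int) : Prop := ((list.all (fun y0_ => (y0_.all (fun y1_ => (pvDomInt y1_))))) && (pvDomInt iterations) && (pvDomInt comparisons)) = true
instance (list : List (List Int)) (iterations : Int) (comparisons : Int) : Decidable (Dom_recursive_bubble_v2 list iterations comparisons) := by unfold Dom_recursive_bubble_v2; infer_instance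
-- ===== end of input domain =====

-- B rewrites A's recursion as two nested iterative loops (simpler); both Pythons mutate `list`
-- in place and return it — the equivalence proved here is about the RETURN value.

-- ===== PORT A =====
-- termination helpers for the literal port of A's recursion (cited in decreasing_by)
theorem pvIdxLt {n : Nat} {i : Int} {k : Nat} (h : PySem.List.pyIdx? n i = some k) : k < n := by
  unfold PySem.List.pyIdx? at h
  split_ifs at h <;> simp_all <;> omega

theorem pvGetSetSelf {α : Type} {xs : List α} {i : Int} {a : α} (h : PySem.List.pyGet? xs i = some a)
    (v : α) : PySem.List.pyGet? (PySem.List.pySetD xs i v) i = some v := by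
  unfold PySem.List.pyGet? at h ⊢
  rcases hk : PySem.List.pyIdx? xs.length i with _ | k
  · simp [hk] at h
  · have hlen : (PySem.List.pySetD xs i v).length = xs.length := PySem.List.length_pySetD ..
    have hset : PySem.List.pySetD xs i v = xs.set k v := by
      simp [PySem.List.pySetD, PySem.List.pySet?, hk]
    rw [hlen, hk, hset]
    simp [List.getElem?_set_self (by simpa using pvIdxLt hk)]

theorem pvTerm1 {L it : Int} (h : ¬ it > L - 1) : (L - (it + 1)).toNat < (L - it).toNat := by
  omega

theorem pvTerm2 {n c : Int} (h : ¬ c > n - 2) :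
    (n + 2 - (c + 1)).toNat < (n + 2 - c).toNat := by
  omega

-- the conditional swap keeps the outer length and the length of row `it`
theorem pvStepInv {list : List (List Int)} {it : Int} {row : List Int}
    (h2 : PySem.List.pyGet? list it = some row) (c a b : Int) :
    (if _ : a > b then
        PySem.List.pySetD list it
          (PySem.List.pySetD (PySem.List.pySetD row c b) (c + 1) a)
      else list).length = list.length ∧
    ((PySem.List.pyGet? (if _ : a > b then
        PySem.List.pySetD list it
          (PySem.List.pySetD (PySem.List.pySetD row c b) (c + 1) a)
      else list) it).getD []).length = row.length := by
  split_ifs with hab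
  · refine ⟨PySem.List.length_pySetD .., ?_⟩
    rw [pvGetSetSelf h2 _]
    simp [PySem.List.length_pySetD]
  · exact ⟨rfl, by rw [h2]; rfl⟩

-- literal transliteration of A: guard, row skip, conditional swap, tail recursion
def recursive_bubble_v2 (list : List (List Int)) (iterations : Int) (comparisons : Int) : List (List Int) :=
  if _h1 : iterations > (list.length : Int) - 1 then list
  else
    match h2 : PySem.List.pyGet? list iterations with
    | none => list  -- Python raises IndexError here (outside Pre_)
    | some row =>
      if _h3 : comparisons > (row.length : Int) - 2 then
        recursive_bubble_v2 list (iterations + 1) 0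
      else
        match PySem.List.pyGet? row comparisons, PySem.List.pyGet? row (comparisons + 1) with
        | some a, some b =>
          let list' := if a > b then
              PySem.List.pySetD list iterations
                (PySem.List.pySetD (PySem.List.pySetD row comparisons b) (comparisons + 1) a)
            else list
          recursive_bubble_v2 list' iterations (comparisons + 1)
        | _, _ => list  -- Python raises IndexError here (outside Pre_)
termination_by ((((list.length : Int) - iterations).toNat,
    ((((PySem.List.pyGet? list iterations).getD []).length : Int) + 2 - comparisons).toNat) : Nat × Nat)
decreasing_by
  · exact Prod.Lex.left _ _ (pvTerm1 _h1)
  · obtain ⟨e1, e2⟩ := pvStepInv h2 comparisons a b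
    rw [e1, e2, h2]
    exact Prod.Lex.right _ (pvTerm2 _h3)

-- ===== PORT B =====
-- B's inner loop body: one comparison/swap of list[i][j] with list[i][j+1]
def pvBInner (i : Int) (acc2 : List (List Int)) (j : Int) : List (List Int) :=
  let row := (PySem.List.pyGet? acc2 i).getD []
  match PySem.List.pyGet? row j, PySem.List.pyGet? row (j + 1) with
  | some a, some b =>
    if a > b then
      PySem.List.pySetD acc2 i (PySem.List.pySetD (PySem.List.pySetD row j b) (j + 1) a)
    else acc2
  | none, _ => acc2    -- Python raises IndexError here (outside Pre_)
  | some _, none => acc2  -- Python raises IndexError here (outside Pre_)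

-- B's outer loop body: one bubble pass over row i, starting at `comparisons` only on the first row
def pvBOuter (iterations : Int) (comparisons : Int) (acc : List (List Int)) (i : Int) : List (List Int) :=
  let start := if i = iterations then comparisons else 0
  (PySem.List.pyRange start ((((PySem.List.pyGet? acc i).getD []).length : Int) - 1) 1).foldl
    (pvBInner i) acc

def recursive_bubble_v2_alt (list : List (List Int)) (iterations : Int) (comparisons : Int) : List (List Int) :=
  (PySem.List.pyRange iterations (list.length : Int) 1).foldl (pvBOuter iterations comparisons) list

-- ===== PRECONDITION & SPEC =====
-- Pre_ is exactly the inputs on which Python A returns (no IndexError): the first visited row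
-- must exist (iterations within Python's negative-index range unless past the end) and the
-- starting offset must either already end the pass or be a valid index into that row.
def Pre_recursive_bubble_v2 (list : List (List Int)) (iterations : Int) (comparisons : Int) : Prop :=
  (list.length : Int) ≤ iterations ∨
  (-(list.length : Int) ≤ iterations ∧
    ((((PySem.List.pyGet? list iterations).getD []).length : Int) - 1 ≤ comparisons ∨
     -((((PySem.List.pyGet? list iterations).getD []).length : Int)) ≤ comparisons))
instance (list : List (List Int)) (iterations : Int) (comparisons : Int) : Decidable (Pre_recursive_bubble_v2 list iterations comparisons) := by unfold Pre_recursive_bubble_v2; infer_instance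

def pvWitness_recursive_bubble_v2 : List (List Int) × Int × Int := ([[3, 1, 2], [2, 1]], 0, 0)

def Spec_recursive_bubble_v2 (list : List (List Int)) (iterations : Int) (comparisons : Int) (out : List (List Int)) : Prop := out = recursive_bubble_v2_alt list iterations comparisons
instance (list : List (List Int)) (iterations : Int) (comparisons : Int) (out : List (List Int)) : Decidable (Spec_recursive_bubble_v2 list iterations comparisons out) := by unfold Spec_recursive_bubble_v2; infer_instance

-- ===== CLAIM (what is proved, stated in full; the proofs are below) =====
def Claim_equal_recursive_bubble_v2 : Prop := ∀ (list : List (List Int)) (iterations : Int) (comparisons : Int), Dom_recursive_bubble_v2 list iterations comparisons → Pre_recursive_bubble_v2 list iterations comparisons → Spec_recursive_bubble_v2 list iterations comparisons (recursive_bubble_v2 list iterations comparisons)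

-- ===== LEMMAS AND PROOFS =====

-- off the first row, B's outer body starts its pass at 0 whatever `comparisons` is
theorem pvBOuter_start_zero (a c : Int) (acc : List (List Int)) (i : Int) (h : i = a → c = 0) :
    pvBOuter a c acc i = pvBOuter i 0 acc i := by
  unfold pvBOuter
  by_cases hi : i = a
  · subst hi; rw [h rfl]
  · simp [hi]

-- B skips a row whose pass is already over
theorem pvB_skip (list : List (List Int)) (it c : Int) (row : List Int)
    (hlt : it < (list.length : Int)) (hrow : PySem.List.pyGet? list it = some row)
    (hc : (row.length : Int) - 1 ≤ c) :
    recursive_bubble_v2_alt list it c = recursive_bubble_v2_alt list (it + 1) 0 := by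
  unfold recursive_bubble_v2_alt
  rw [PySem.List.pyRange_one_cons hlt, List.foldl_cons]
  have h1 : pvBOuter it c list it = list := by
    unfold pvBOuter
    rw [if_pos rfl]
    simp only [hrow, Option.getD_some]
    rw [PySem.List.pyRange_one_eq_nil hc, List.foldl_nil]
  rw [h1]
  refine PySem.List.foldl_congr_mem _ _ _ _ ?_
  intro acc i hi
  have hmem := (PySem.List.mem_pyRange_one).1 hi
  rw [pvBOuter_start_zero it c acc i (fun he => absurd he (by omega)),
      pvBOuter_start_zero (it + 1) 0 acc i (fun _ => rfl)]

-- B's first inner step performs exactly A's conditional swap, then continues at c + 1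
theorem pvB_step (list list' : List (List Int)) (it c : Int) (row : List Int)
    (hlt : it < (list.length : Int)) (hrow : PySem.List.pyGet? list it = some row)
    (hc : c < (row.length : Int) - 1)
    (hlen' : list'.length = list.length)
    (hrowlen : ((PySem.List.pyGet? list' it).getD []).length = row.length)
    (hbody : pvBInner it list c = list') :
    recursive_bubble_v2_alt list it c = recursive_bubble_v2_alt list' it (c + 1) := by
  unfold recursive_bubble_v2_alt
  rw [hlen', PySem.List.pyRange_one_cons hlt, List.foldl_cons, List.foldl_cons]
  have hfirst : pvBOuter it c list it = pvBOuter it (c + 1) list' it := by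
    unfold pvBOuter
    rw [if_pos rfl, if_pos rfl]
    simp only [hrow, Option.getD_some, hrowlen]
    rw [PySem.List.pyRange_one_cons hc, List.foldl_cons, hbody]
  rw [hfirst]
  refine PySem.List.foldl_congr_mem _ _ _ _ ?_
  intro acc i hi
  have hmem := (PySem.List.mem_pyRange_one).1 hi
  rw [pvBOuter_start_zero it c acc i (fun he => absurd he (by omega)),
      pvBOuter_start_zero it (c + 1) acc i (fun he => absurd he (by omega))]

-- the main equivalence, by A's functional induction
theorem pvMain : ∀ (list : List (List Int)) (iterations comparisons : Int),
    Pre_recursive_bubble_v2 list iterations comparisons →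
    recursive_bubble_v2 list iterations comparisons =
    recursive_bubble_v2_alt list iterations comparisons := by
  intro list iterations comparisons
  fun_induction recursive_bubble_v2 list iterations comparisons with
  | case1 list it c h1 =>
    intro _
    unfold recursive_bubble_v2_alt
    rw [PySem.List.pyRange_one_eq_nil (by omega), List.foldl_nil]
  | case2 list it c h1 h2 =>
    intro hpre
    exfalso
    rcases hpre with h | ⟨hge, _⟩
    · omega
    · have := (PySem.List.pyGet?_eq_none_iff list it).1 h2
      exact this ⟨by omega, by omega⟩
  | case3 list it c h1 row h2 h3 ih =>
    intro hpre
    rw [ih ?_, pvB_skip list it c row (by omega) h2 (by omega)]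
    unfold Pre_recursive_bubble_v2
    right
    refine ⟨by rcases hpre with h | ⟨hge, _⟩ <;> omega, Or.inr ?_⟩
    have : (0:Int) ≤ (((PySem.List.pyGet? list (it + 1)).getD []).length : Int) := by positivity
    omega
  | case4 list it c h1 row h2 h3 a b hb ha list' ih =>
    intro hpre
    have hcin : -((row.length : Int)) ≤ c := by
      rcases hpre with h | ⟨hge, hco⟩
      · omega
      · rcases hco with h | h
        · rw [h2] at h; simp at h; omega
        · rw [h2] at h; simpa using h
    have hlen' : list'.length = list.length := by
      simp only [list']
      split_ifs with hab
      · simp [PySem.List.length_pySetD]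
      · rfl
    have hrowlen : ((PySem.List.pyGet? list' it).getD []).length = row.length := by
      simp only [list']
      split_ifs with hab
      · rw [pvGetSetSelf h2 _]
        simp [PySem.List.length_pySetD]
      · rw [h2]; rfl
    have hbody : pvBInner it list c = list' := by
      unfold pvBInner
      simp only [h2, Option.getD_some, ha, hb]
      simp only [list']
      split_ifs <;> rfl
    rw [ih ?_, ← pvB_step list list' it c row (by omega) h2 (by omega) hlen' hrowlen hbody]
    unfold Pre_recursive_bubble_v2
    right
    refine ⟨?_, Or.inr ?_⟩
    · rw [hlen']
      rcases hpre with h | ⟨hge, _⟩ <;> omega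
    · rw [hrowlen]
      omega
  | case5 list it c h1 row h2 h3 hmiss =>
    intro hpre
    exfalso
    have hcin : -((row.length : Int)) ≤ c ∧ c ≤ (row.length : Int) - 2 := by
      rcases hpre with h | ⟨hge, hco⟩
      · omega
      · rcases hco with h | h
        · rw [h2] at h; simp at h; omega
        · rw [h2] at h; simp at h; omega
    have ha : (PySem.List.pyGet? row c).isSome := by
      rw [Option.isSome_iff_ne_none]
      intro hn
      exact (PySem.List.pyGet?_eq_none_iff row c).1 hn ⟨by omega, by omega⟩
    have hb : (PySem.List.pyGet? row (c + 1)).isSome := by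
      rw [Option.isSome_iff_ne_none]
      intro hn
      exact (PySem.List.pyGet?_eq_none_iff row (c + 1)).1 hn ⟨by omega, by omega⟩
    rcases Option.isSome_iff_exists.1 ha with ⟨x, hx⟩
    rcases Option.isSome_iff_exists.1 hb with ⟨y, hy⟩
    exact hmiss x y hx hy

-- ===== VERDICT (by name: the statement is the Claim_ definition above) =====
theorem recursive_bubble_v2_spec : Claim_equal_recursive_bubble_v2 := by
  intro list iterations comparisons _ hpre
  exact pvMain list iterations comparisons hpre
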